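-- pv_equiv track=rewrite | github.com/stopwhispering/plants-backend | generate_ts_definitions.py | _remove_shared_model
-- ===== SOURCE A (Python) =====
-- def _remove_shared_model(lines: list[str], model_name: str) -> list[str]:
--     lines_start = [l for l in lines if l.startswith('export interface ' + model_name + ' ')]
--     if not lines_start:
--         return lines
--     if len(lines_start) > 1:
--         raise ValueError(f"Found more than one line starting with {model_name}")
--     line_start = lines_start[0]
--     line_start_index = lines.index(line_start)
--     line_end_index = None
--     for i, line in enumerate(lines[line_start_index + 1:]):
--         if line.startswith('}'):
--             line_end_index = line_start_index + i + 1
--             break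
--     if not line_end_index:
--         raise ValueError(f"Could not find end of {model_name}")
--     lines_new = lines[:line_start_index] + lines[line_end_index + 1:]
--     return lines_new
-- ===== SOURCE B (Python) =====
-- def _remove_shared_model(lines: list[str], model_name: str) -> list[str]:
--     prefix = 'export interface ' + model_name + ' '
--     count = sum(1 for l in lines if l.startswith(prefix))
--     if count == 0:
--         return lines
--     if count > 1:
--         raise ValueError(f"Found more than one line starting with {model_name}")
--     out = []
--     skipping = False
--     for line in lines:
--         if skipping:
--             if line.startswith('}'):
--                 skipping = False
--         elif line.startswith(prefix):
--             skipping = True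
--         else:
--             out.append(line)
--     if skipping:
--         raise ValueError(f"Could not find end of {model_name}")
--     return out
-- ===== Notes on version B (the rewrite author's own statement) =====
-- stated objective: simpler
-- what changed: Replaces A's locate-then-splice (filter all matches, list.index to re-find the start line, a scan over the slice lines[start+1:] for the closing brace, then slice concatenation) with a single state-machine pass that builds the output while a boolean 'skipping' flag drops the block; only the duplicate check remains a separate count.
import Mathlib
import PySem

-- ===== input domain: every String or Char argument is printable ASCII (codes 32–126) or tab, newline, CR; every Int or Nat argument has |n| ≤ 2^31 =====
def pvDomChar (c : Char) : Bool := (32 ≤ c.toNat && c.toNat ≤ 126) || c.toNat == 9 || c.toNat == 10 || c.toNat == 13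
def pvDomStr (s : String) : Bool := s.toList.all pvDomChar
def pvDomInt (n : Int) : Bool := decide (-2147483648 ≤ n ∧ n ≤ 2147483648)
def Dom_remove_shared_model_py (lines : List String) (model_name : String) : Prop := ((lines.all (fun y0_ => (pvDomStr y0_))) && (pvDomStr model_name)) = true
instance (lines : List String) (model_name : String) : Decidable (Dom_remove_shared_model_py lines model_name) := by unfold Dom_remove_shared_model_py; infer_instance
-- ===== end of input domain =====

-- B replaces A's locate-by-index-then-splice (filter, list.index, scan of a slice, slice
-- concatenation) with a single state-machine pass that copies lines while a boolean
-- 'skipping' flag drops the interface block; objective: simpler.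


-- ===== PORT A =====
-- Literal port of _remove_shared_model.  Both 'raise ValueError' branches return 'lines'
-- here; exactly those inputs are excluded by Pre_.  The slices lines[:i] / lines[i+1:]
-- are take/drop: both indices are nonnegative, where slice = take/drop exactly.
-- 'if not line_end_index' is falsy only for None here (the index found is ≥ 1), so it is
-- ported as the option match.
def remove_shared_model_py (lines : List String) (model_name : String) : List String :=
  let pfx := "export interface " ++ model_name ++ " "
  let lines_start := lines.filter (fun l => PySem.Str.startswith l pfx)
  if lines_start.isEmpty then lines
  else if lines_start.length > 1 then lines  -- raise ValueError (excluded by Pre_)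
  else
    let line_start := lines_start.headD ""
    match PySem.List.index? lines line_start with
    | none => lines  -- unreachable: line_start ∈ lines
    | some si =>
      -- for i, line in enumerate(lines[si+1:]): first line starting with '}'
      match List.findIdx? (fun l => PySem.Str.startswith l "}") (lines.drop (si + 1)) with
      | none => lines  -- raise ValueError (excluded by Pre_)
      | some i => lines.take si ++ lines.drop (si + i + 1 + 1)

-- ===== PORT B =====
-- Literal port of Source B: count the start lines, then one fold with state (out, skipping);
-- the two 'raise' branches return 'lines' (excluded by Pre_).
def remove_shared_model_py_alt (lines : List String) (model_name : String) : List String :=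
  let pfx := "export interface " ++ model_name ++ " "
  let count := lines.countP (fun l => PySem.Str.startswith l pfx)
  if count = 0 then lines
  else if count > 1 then lines  -- raise ValueError (excluded by Pre_)
  else
    let st := lines.foldl (fun (s : List String × Bool) line =>
      if s.2 then
        if PySem.Str.startswith line "}" then (s.1, false) else s
      else if PySem.Str.startswith line pfx then (s.1, true)
      else (s.1 ++ [line], false)) ([], false)
    if st.2 then lines  -- raise ValueError (excluded by Pre_)
    else st.1

-- ===== PRECONDITION & SPEC =====
-- Pre_ excludes exactly the inputs on which A raises ValueError: more than one start
-- line, or a start line with no following line beginning with '}'.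
def Pre_remove_shared_model_py (lines : List String) (model_name : String) : Prop :=
  let pfx := "export interface " ++ model_name ++ " "
  let count := lines.countP (fun l => PySem.Str.startswith l pfx)
  count = 0 ∨ (count = 1 ∧ ∃ i < lines.length, ∃ j < lines.length, i < j ∧
    PySem.Str.startswith (lines.getD i "") pfx = true ∧
    PySem.Str.startswith (lines.getD j "") "}" = true)
instance (lines : List String) (model_name : String) : Decidable (Pre_remove_shared_model_py lines model_name) := by unfold Pre_remove_shared_model_py; infer_instance

def pvWitness_remove_shared_model_py : List String × String :=
  (["keep", "export interface X {", "a: number;", "}", "tail"], "X")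

def Spec_remove_shared_model_py (lines : List String) (model_name : String) (out : List String) : Prop := out = remove_shared_model_py_alt lines model_name
instance (lines : List String) (model_name : String) (out : List String) : Decidable (Spec_remove_shared_model_py lines model_name out) := by unfold Spec_remove_shared_model_py; infer_instance

-- ===== CLAIM (what is proved, stated in full; the proofs are below) =====
def Claim_equal_remove_shared_model_py : Prop := ∀ (lines : List String) (model_name : String), Dom_remove_shared_model_py lines model_name → Pre_remove_shared_model_py lines model_name → Spec_remove_shared_model_py lines model_name (remove_shared_model_py lines model_name)

-- ===== LEMMAS AND PROOFS =====

-- B's loop body, abstracted over the two tests (used only by the proofs below).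
def pvStep (p q : String → Bool) (s : List String × Bool) (line : String) : List String × Bool :=
  if s.2 then
    if q line then (s.1, false) else s
  else if p line then (s.1, true)
  else (s.1 ++ [line], false)

-- With skipping = false and no start line in l, the fold just copies l.
theorem pvFold_copy (p q : String → Bool) (l : List String) (acc : List String)
    (hp : ∀ x ∈ l, ¬ p x = true) :
    l.foldl (pvStep p q) (acc, false) = (acc ++ l, false) := by
  induction l generalizing acc with
  | nil => simp
  | cons x xs ih =>
      have hx : ¬ p x = true := hp x (by simp)
      have hstep : pvStep p q (acc, false) x = (acc ++ [x], false) := by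
        simp [pvStep, hx]
      rw [List.foldl_cons, hstep, ih (acc ++ [x]) (fun y hy => hp y (by simp [hy]))]
      simp

-- With skipping = true, no start line in l, and first '}' at index e, the fold drops
-- through the '}' and copies the rest.
theorem pvFold_skip (p q : String → Bool) (l : List String) (acc : List String) (e : Nat)
    (hp : ∀ x ∈ l, ¬ p x = true)
    (he : List.findIdx? q l = some e) :
    l.foldl (pvStep p q) (acc, true) = (acc ++ l.drop (e + 1), false) := by
  induction l generalizing acc e with
  | nil => simp at he
  | cons x xs ih =>
      rw [List.findIdx?_cons] at he
      by_cases hqx : q x = true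
      · simp only [hqx, if_true, Option.some.injEq] at he
        subst he
        have hstep : pvStep p q (acc, true) x = (acc, false) := by
          simp [pvStep, hqx]
        rw [List.foldl_cons, hstep, pvFold_copy p q xs acc (fun y hy => hp y (by simp [hy]))]
        simp
      · simp only [hqx] at he
        obtain ⟨e', he', rfl⟩ := Option.map_eq_some_iff.mp he
        have hstep : pvStep p q (acc, true) x = (acc, true) := by
          simp [pvStep, hqx]
        rw [List.foldl_cons, hstep, ih acc e' (fun y hy => hp y (by simp [hy])) he']
        simp

-- ===== VERDICT (by name: the statement is the Claim_ definition above) =====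
theorem remove_shared_model_py_spec : Claim_equal_remove_shared_model_py := by
  intro lines model_name _hdom hpre
  unfold Spec_remove_shared_model_py remove_shared_model_py remove_shared_model_py_alt
  unfold Pre_remove_shared_model_py at hpre
  simp only at hpre ⊢
  rcases hpre with h0 | ⟨h1, i, hi, j, hj, hij, hpi, hqj⟩
  · -- no start line: both return lines
    have hfil : lines.filter (fun l => PySem.Str.startswith l ("export interface " ++ model_name ++ " ")) = [] := by
      rw [← List.length_eq_zero_iff, ← List.countP_eq_length_filter]; exact h0
    rw [hfil, h0]
    simp
  · -- exactly one start line and an end exists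
    have hlen : (lines.filter (fun l => PySem.Str.startswith l ("export interface " ++ model_name ++ " "))).length = 1 := by
      rw [← List.countP_eq_length_filter]; exact h1
    obtain ⟨a, ha⟩ := List.length_eq_one_iff.mp hlen
    obtain ⟨pre, suf, hdec, hpre0, hpa, hsufnil⟩ := List.filter_eq_cons_iff.mp ha
    have hsuf0 : ∀ x ∈ suf, ¬ PySem.Str.startswith x ("export interface " ++ model_name ++ " ") = true :=
      List.filter_eq_nil_iff.mp hsufnil
    subst hdec
    -- the unique start line sits at index pre.length
    have hiidx : i = pre.length := by
      rcases Nat.lt_trichotomy i pre.length with h | h | h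
      · exfalso
        rw [List.getD_eq_getElem _ _ hi, List.getElem_append_left h] at hpi
        exact hpre0 _ (List.getElem_mem h) hpi
      · exact h
      · exfalso
        rw [List.getD_eq_getElem _ _ hi, List.getElem_append_right (Nat.le_of_lt h)] at hpi
        obtain ⟨k, hk⟩ : ∃ k, i - pre.length = k + 1 := ⟨i - pre.length - 1, by omega⟩
        simp only [hk, List.getElem_cons_succ] at hpi
        exact hsuf0 _ (List.getElem_mem _) hpi
    -- the '}' line sits in suf, so findIdx? finds some index e
    have hjgt : pre.length < j := hiidx ▸ hij
    have hqsuf : ∃ x ∈ suf, PySem.Str.startswith x "}" = true := by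
      rw [List.getD_eq_getElem _ _ hj, List.getElem_append_right (Nat.le_of_lt hjgt)] at hqj
      obtain ⟨k, hk⟩ : ∃ k, j - pre.length = k + 1 := ⟨j - pre.length - 1, by omega⟩
      simp only [hk, List.getElem_cons_succ] at hqj
      exact ⟨_, List.getElem_mem _, hqj⟩
    have hfind : (List.findIdx? (fun l => PySem.Str.startswith l "}") suf).isSome := by
      rw [Option.isSome_iff_ne_none]
      intro hnone
      obtain ⟨x, hx, hqx⟩ := hqsuf
      have hxf := List.findIdx?_eq_none_iff.mp hnone x hx
      rw [hxf] at hqx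
      simp at hqx
    obtain ⟨e, he⟩ := Option.isSome_iff_exists.mp hfind
    -- A's intermediate values
    have hanotpre : a ∉ pre := fun hmem => hpre0 a hmem hpa
    have hidx : PySem.List.index? (pre ++ a :: suf) a = some pre.length := by
      rw [PySem.List.index?_eq_some_iff]
      exact ⟨pre, suf, rfl, rfl, hanotpre⟩
    have hdrop1 : (pre ++ a :: suf).drop (pre.length + 1) = suf := by
      have h2 : pre ++ a :: suf = (pre ++ [a]) ++ suf := by simp
      rw [h2, List.drop_left' (by simp)]
    have htake : (pre ++ a :: suf).take pre.length = pre := List.take_left' rfl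
    have hdrop2 : (pre ++ a :: suf).drop (pre.length + e + 1 + 1) = suf.drop (e + 1) := by
      have h3 : pre.length + e + 1 + 1 = (pre.length + 1) + (e + 1) := by omega
      rw [h3, ← List.drop_drop, hdrop1]
    -- reduce A's port
    rw [ha, h1]
    simp only [List.isEmpty_cons, Bool.false_eq_true, if_false, List.length_cons,
      List.length_nil, List.headD_cons, gt_iff_lt, Nat.lt_irrefl, Nat.zero_add,
      hidx, hdrop1, he, htake, hdrop2]
    -- reduce B's port
    have hone : ¬ (1 : Nat) = 0 := by omega
    have hone' : ¬ (1 : Nat) > 1 := by omega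
    simp only [hone, if_false]
    have hlam : (fun (s : List String × Bool) line =>
        if s.2 then
          if PySem.Str.startswith line "}" then (s.1, false) else s
        else if PySem.Str.startswith line ("export interface " ++ model_name ++ " ") then (s.1, true)
        else (s.1 ++ [line], false)) =
        pvStep (fun l => PySem.Str.startswith l ("export interface " ++ model_name ++ " "))
               (fun l => PySem.Str.startswith l "}") := rfl
    rw [hlam, List.foldl_append, pvFold_copy _ _ pre [] hpre0, List.foldl_cons]
    have hstep : pvStep (fun l => PySem.Str.startswith l ("export interface " ++ model_name ++ " "))
        (fun l => PySem.Str.startswith l "}") (([] : List String) ++ pre, false) a = (pre, true) := by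
      simp only [pvStep, Bool.false_eq_true, if_false, hpa, if_true, List.nil_append]
    rw [hstep, pvFold_skip _ _ suf pre e hsuf0 he]
    simp
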